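-- pv_equiv track=rewrite | github.com/RenanCecchin/Line-Code-Viewer | line_codes.py | ami
-- ===== SOURCE A (Python) =====
-- def ami(bits_sequence):
--     ami_bits = []
--     positive_wave = True
--
--     for bit in bits_sequence:
--         if bit == 0:
--             ami_bits.append(0)
--         else:
--             if positive_wave:
--                 ami_bits.append(1)
--                 positive_wave = False
--             else:
--                 ami_bits.append(-1)
--                 positive_wave = True
--
--     return ami_bits
-- ===== SOURCE B (Python) =====
-- def ami(bits_sequence):
--     out = [0] * len(bits_sequence)
--     pulses = [i for i, bit in enumerate(bits_sequence) if bit != 0]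
--     for j, i in enumerate(pulses):
--         out[i] = 1 if j % 2 == 0 else -1
--     return out
-- ===== Notes on version B (the rewrite author's own statement) =====
-- stated objective: alternative
-- what changed: B builds a zero-filled output of the input's length, gathers the positions of all nonzero pulses with one enumerate-comprehension, and scatters alternating +1/-1 into those positions by the rank of each pulse, replacing A's per-element toggling boolean state machine that appends one value at a time.
import Mathlib
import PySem

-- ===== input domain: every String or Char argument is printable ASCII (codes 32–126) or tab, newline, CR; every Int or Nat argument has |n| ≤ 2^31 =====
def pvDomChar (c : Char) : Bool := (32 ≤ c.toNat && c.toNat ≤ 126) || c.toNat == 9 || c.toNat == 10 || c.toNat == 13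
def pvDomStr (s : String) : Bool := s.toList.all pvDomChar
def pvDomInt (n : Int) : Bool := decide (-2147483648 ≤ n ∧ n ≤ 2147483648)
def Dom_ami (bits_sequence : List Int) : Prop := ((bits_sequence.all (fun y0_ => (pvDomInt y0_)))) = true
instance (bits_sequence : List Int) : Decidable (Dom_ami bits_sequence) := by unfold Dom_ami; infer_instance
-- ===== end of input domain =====

-- B gathers the nonzero-pulse positions and scatters alternating +1/-1 into a zero-filled
-- output by pulse rank, instead of A's per-element toggling state machine (objective: alternative, same cost).


-- ===== PORT A =====
def ami (bits_sequence : List Int) : List Int :=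
  (bits_sequence.foldl
    (fun (st : List Int × Bool) bit =>
      if bit = 0 then (st.1 ++ [0], st.2)
      else if st.2 then (st.1 ++ [1], false)
      else (st.1 ++ [-1], true))
    ([], true)).1

-- ===== PORT B =====
-- `out[i] = v`: the index i comes from enumerate so 0 ≤ i < len(out); list assignment is List.set i.toNat
def ami_alt (bits_sequence : List Int) : List Int :=
  let out := List.replicate bits_sequence.length (0 : Int)
  let pulses := ((PySem.List.enumerate bits_sequence 0).filter (fun p => p.2 != 0)).map Prod.fst
  (PySem.List.enumerate pulses 0).foldl
    (fun out ji => out.set ji.2.toNat (if ji.1 % 2 = 0 then 1 else -1)) out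

-- ===== PRECONDITION & SPEC =====
def Spec_ami (bits_sequence : List Int) (out : List Int) : Prop := out = ami_alt bits_sequence
instance (bits_sequence : List Int) (out : List Int) : Decidable (Spec_ami bits_sequence out) := by unfold Spec_ami; infer_instance

-- ===== CLAIM (what is proved, stated in full; the proofs are below) =====
def Claim_equal_ami : Prop := ∀ (bits_sequence : List Int), Dom_ami bits_sequence → Spec_ami bits_sequence (ami bits_sequence)

-- ===== LEMMAS AND PROOFS =====

-- Common reference form: AMI encoding with the pending polarity as a Bool.
def amiRef : List Int → Bool → List Int
  | [], _ => []
  | b :: rest, pw =>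
    if b = 0 then 0 :: amiRef rest pw
    else (if pw then (1 : Int) else -1) :: amiRef rest (!pw)

-- A's fold with an append accumulator is `acc ++ amiRef`.
theorem ami_foldl_eq (l : List Int) : ∀ (acc : List Int) (pw : Bool),
    (l.foldl
      (fun (st : List Int × Bool) bit =>
        if bit = 0 then (st.1 ++ [0], st.2)
        else if st.2 then (st.1 ++ [1], false)
        else (st.1 ++ [-1], true))
      (acc, pw)).1 = acc ++ amiRef l pw := by
  induction l with
  | nil => intro acc pw; simp [amiRef]
  | cons b rest ih =>
    intro acc pw
    by_cases hb : b = 0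
    · simp [hb, amiRef, ih]
    · cases pw <;> simp [hb, amiRef, ih]

def pulsesOf (l : List Int) : List Int :=
  ((PySem.List.enumerate l 0).filter (fun p => p.2 != 0)).map Prod.fst

-- enumerate with a shifted start is a map over enumerate.
theorem enum_shift {α : Type} (l : List α) : ∀ (s : Int),
    PySem.List.enumerate l (s + 1) = (PySem.List.enumerate l s).map (fun p => (p.1 + 1, p.2)) := by
  induction l with
  | nil => intro s; simp [PySem.List.enumerate_nil]
  | cons x xs ih =>
    intro s
    rw [PySem.List.enumerate_cons, PySem.List.enumerate_cons, List.map_cons, ← ih (s + 1)]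

theorem pulsesOf_cons (b : Int) (rest : List Int) :
    pulsesOf (b :: rest) =
      (if b = 0 then [] else [(0 : Int)]) ++ (pulsesOf rest).map (fun i => i + 1) := by
  unfold pulsesOf
  rw [PySem.List.enumerate_cons, enum_shift rest 0]
  by_cases hb : b = 0 <;>
    simp [hb, List.filter_map, List.map_map, Function.comp_def]

theorem pulsesOf_nonneg (l : List Int) : ∀ i ∈ pulsesOf l, 0 ≤ i := by
  intro i hi
  unfold pulsesOf at hi
  rcases List.mem_map.mp hi with ⟨p, hp, rfl⟩
  rcases (PySem.List.mem_enumerate_iff _ _ _).mp (List.mem_of_mem_filter hp) with ⟨k, hk, rfl⟩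
  simp

-- Scattering shifted indices over a cons leaves the head alone.
theorem scatter_shift (p : List Int) : ∀ (j0 : Int) (x : Int) (out : List Int),
    (∀ i ∈ p, 0 ≤ i) →
    (PySem.List.enumerate (p.map (fun i => i + 1)) j0).foldl
      (fun out ji => out.set ji.2.toNat (if ji.1 % 2 = 0 then (1 : Int) else -1)) (x :: out)
    = x :: (PySem.List.enumerate p j0).foldl
      (fun out ji => out.set ji.2.toNat (if ji.1 % 2 = 0 then (1 : Int) else -1)) out := by
  induction p with
  | nil => intro j0 x out _; simp [PySem.List.enumerate_nil]
  | cons i p' ih =>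
    intro j0 x out hnn
    have hi : 0 ≤ i := hnn i (by simp)
    rw [List.map_cons, PySem.List.enumerate_cons, PySem.List.enumerate_cons,
        List.foldl_cons, List.foldl_cons]
    have hset : (x :: out).set (i + 1).toNat (if j0 % 2 = 0 then (1 : Int) else -1)
        = x :: out.set i.toNat (if j0 % 2 = 0 then (1 : Int) else -1) := by
      have : (i + 1).toNat = i.toNat + 1 := by omega
      rw [this, List.set_cons_succ]
    rw [hset, ih (j0 + 1) x _ (fun i hi => hnn i (by simp [hi]))]

-- B's scatter over the pulse list equals the reference form, for any start rank j0 ≥ 0.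
theorem scatter_eq (bits : List Int) : ∀ (j0 : Int), 0 ≤ j0 →
    (PySem.List.enumerate (pulsesOf bits) j0).foldl
      (fun out ji => out.set ji.2.toNat (if ji.1 % 2 = 0 then (1 : Int) else -1))
      (List.replicate bits.length 0)
    = amiRef bits (decide (j0 % 2 = 0)) := by
  induction bits with
  | nil => intro j0 _; simp [pulsesOf, PySem.List.enumerate_nil, amiRef]
  | cons b rest ih =>
    intro j0 hj0
    rw [pulsesOf_cons, List.length_cons, List.replicate_succ]
    by_cases hb : b = 0
    · rw [if_pos hb, List.nil_append,
          scatter_shift (pulsesOf rest) j0 0 _ (pulsesOf_nonneg rest), ih j0 hj0]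
      simp [amiRef, hb]
    · rw [if_neg hb, List.singleton_append, PySem.List.enumerate_cons, List.foldl_cons]
      have hset : (((0 : Int) :: List.replicate rest.length 0).set (0 : Int).toNat
            (if j0 % 2 = 0 then (1 : Int) else -1))
          = (if j0 % 2 = 0 then (1 : Int) else -1) :: List.replicate rest.length 0 := by
        simp
      rw [hset, scatter_shift (pulsesOf rest) (j0 + 1) _ _ (pulsesOf_nonneg rest),
          ih (j0 + 1) (by omega)]
      have hpar : decide ((j0 + 1) % 2 = 0) = !decide (j0 % 2 = 0) := by
        by_cases h : j0 % 2 = 0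
        · simp [h, show (j0 + 1) % 2 = 1 by omega]
        · simp [h, show (j0 + 1) % 2 = 0 by omega]
      rw [hpar]
      by_cases h : j0 % 2 = 0 <;> simp [amiRef, hb, h]

-- ===== VERDICT (by name: the statement is the Claim_ definition above) =====
theorem ami_spec : Claim_equal_ami := by
  intro l _
  unfold Spec_ami ami ami_alt
  rw [ami_foldl_eq l [] true, show (true = decide ((0 : Int) % 2 = 0)) by decide]
  rw [← scatter_eq l 0 le_rfl]
  rfl
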